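-- pv_equiv track=rewrite | github.com/Chriseyy/adventiiofcodiii | python/2025/02/02.py | part2_repeating_split
-- ===== SOURCE A (Python) =====
-- def part2_repeating_split(num):
--     s_num = str(num)
--     length = len(s_num)
--
--     for k in range(1, length // 2 + 1):
--
--         if length % k == 0:
--             pattern = s_num[:k]
--             times_to_repeat = length // k
--
--             if pattern * times_to_repeat == s_num:
--                 return True
-- ===== SOURCE B (Python) =====
-- def part2_repeating_split(num):
--     s = str(num)
--     if (s + s)[1:-1].find(s) != -1:
--         return True
-- ===== Notes on version B (the rewrite author's own statement) =====
-- stated objective: idiomatic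
-- what changed: Replaces the divisor-enumeration loop that rebuilds pattern*times for every divisor with the classic string-doubling test: s is a repeated pattern iff s occurs in (s+s)[1:-1], keeping the fall-through None on no match.
import Mathlib
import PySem

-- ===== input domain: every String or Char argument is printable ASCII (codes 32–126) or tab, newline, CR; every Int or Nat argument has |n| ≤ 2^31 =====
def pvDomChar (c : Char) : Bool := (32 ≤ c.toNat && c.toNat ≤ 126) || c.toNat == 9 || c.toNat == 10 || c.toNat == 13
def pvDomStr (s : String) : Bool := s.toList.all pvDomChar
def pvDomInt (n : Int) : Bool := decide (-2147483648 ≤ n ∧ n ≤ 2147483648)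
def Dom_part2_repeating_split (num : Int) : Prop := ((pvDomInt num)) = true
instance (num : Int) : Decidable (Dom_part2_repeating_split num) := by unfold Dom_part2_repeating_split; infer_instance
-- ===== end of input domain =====

-- B replaces A's divisor-enumeration loop by the standard string-doubling periodicity test
-- (s occurs in (s+s)[1:-1] iff s is a repeated pattern), keeping the fall-through None.

-- ===== PORT A =====

-- Python `pattern * times` on a list (exact: Python yields [] for times ≤ 0, which Int.toNat matches)
def pyListMul {α : Type} (xs : List α) (t : Int) : List α :=
  (List.replicate t.toNat xs).flatten

-- A's for-loop over the remaining values of range(1, length//2 + 1), with its early `return True`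
def part2Loop (s : List Char) (length : Int) : List Int → Option Bool
  | [] => none
  | k :: ks =>
    if PySem.Int.mod length k = 0 then
      let pattern := PySem.List.slice s none (some k)
      let times_to_repeat := PySem.Int.floordiv length k
      if pyListMul pattern times_to_repeat = s then some true
      else part2Loop s length ks
    else part2Loop s length ks

def part2_repeating_split (num : Int) : Option Bool :=
  let s_num := PySem.Int.toChars num
  let length := PySem.Chars.len s_num
  part2Loop s_num length (PySem.List.pyRange 1 (PySem.Int.floordiv length 2 + 1) 1)

-- ===== PORT B =====
def part2_repeating_split_alt (num : Int) : Option Bool :=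
  let s := PySem.Int.toChars num
  if PySem.Chars.find (PySem.List.slice (s ++ s) (some 1) (some (-1))) s ≠ -1 then some true
  else none

-- ===== PRECONDITION & SPEC =====
def Spec_part2_repeating_split (num : Int) (out : Option Bool) : Prop := out = part2_repeating_split_alt num
instance (num : Int) (out : Option Bool) : Decidable (Spec_part2_repeating_split num out) := by unfold Spec_part2_repeating_split; infer_instance

-- ===== CLAIM (what is proved, stated in full; the proofs are below) =====
def Claim_equal_part2_repeating_split : Prop := ∀ (num : Int), Dom_part2_repeating_split num → Spec_part2_repeating_split num (part2_repeating_split num)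

-- ===== LEMMAS AND PROOFS =====

-- A's test at divisor k, in Nat form
def ACond (s : List Char) (k : Nat) : Prop :=
  1 ≤ k ∧ 2 * k ≤ s.length ∧ k ∣ s.length ∧
    (List.replicate (s.length / k) (s.take k)).flatten = s

-- the loop returns `some true` iff some k in the remaining range satisfies its test, else falls through
lemma part2Loop_eq (s : List Char) (n : Int) (ks : List Int) :
    part2Loop s n ks =
      if ∃ k ∈ ks, PySem.Int.mod n k = 0 ∧
          pyListMul (PySem.List.slice s none (some k)) (PySem.Int.floordiv n k) = s
      then some true else none := by
  induction ks with
  | nil => simp [part2Loop]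
  | cons k ks ih =>
    simp only [part2Loop, ih]
    by_cases h1 : PySem.Int.mod n k = 0 <;>
      by_cases h2 : pyListMul (PySem.List.slice s none (some k)) (PySem.Int.floordiv n k) = s <;>
      simp [h1, h2]

-- the loop's Int-side test over range(1, n//2+1) is the Nat-side divisor condition
lemma exists_range_iff (s : List Char) :
    (∃ k ∈ PySem.List.pyRange 1 (PySem.Int.floordiv (s.length : Int) 2 + 1) 1,
        PySem.Int.mod (s.length : Int) k = 0 ∧
        pyListMul (PySem.List.slice s none (some k)) (PySem.Int.floordiv (s.length : Int) k) = s)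
    ↔ ∃ k, ACond s k := by
  have hfd : PySem.Int.floordiv (s.length : Int) 2 = ((s.length / 2 : Nat) : Int) := by
    exact_mod_cast PySem.Int.floordiv_natCast s.length 2
  constructor
  · rintro ⟨k, hmem, h1, h2⟩
    rw [PySem.List.mem_pyRange_one, hfd] at hmem
    obtain ⟨hk1, hk2⟩ := hmem
    have hkk : ((k.toNat : Nat) : Int) = k := Int.toNat_of_nonneg (by omega)
    have hdvd : k.toNat ∣ s.length := by
      rw [PySem.Int.mod_eq_zero_iff_dvd] at h1
      rw [← hkk] at h1
      exact_mod_cast h1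
    have hfdk : PySem.Int.floordiv (s.length : Int) k = ((s.length / k.toNat : Nat) : Int) := by
      rw [← hkk]
      exact_mod_cast PySem.Int.floordiv_natCast s.length k.toNat
    refine ⟨k.toNat, by omega, ?_, hdvd, ?_⟩
    · have hh : k.toNat ≤ s.length / 2 := by omega
      have h2 := Nat.div_mul_le_self s.length 2
      omega
    · rw [PySem.List.slice_to s (b := k) (by omega), hfdk] at h2
      simp only [pyListMul, Int.toNat_natCast] at h2
      exact h2
  · rintro ⟨k, hk1, hk2, hdvd, hrep⟩
    refine ⟨(k : Int), ?_, ?_, ?_⟩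
    · rw [PySem.List.mem_pyRange_one, hfd]
      have : k ≤ s.length / 2 := Nat.le_div_iff_mul_le (by omega) |>.mpr (by omega)
      omega
    · rw [PySem.Int.mod_eq_zero_iff_dvd]
      exact_mod_cast hdvd
    · have hfdk : PySem.Int.floordiv (s.length : Int) (k : Int) = ((s.length / k : Nat) : Int) := by
        exact_mod_cast PySem.Int.floordiv_natCast s.length k
      rw [PySem.List.slice_to s (b := (k : Int)) (by omega), hfdk]
      simp only [pyListMul, Int.toNat_natCast]
      exact hrep

-- rotating by j ≤ n fixes s exactly when s has period j
lemma hasPeriod_of_rotate_eq (s : List Char) (j : Nat) (hj : j ≤ s.length)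
    (h : s.rotate j = s) : List.HasPeriod s j := by
  rw [List.hasPeriod_iff_getElem?]
  intro m hm
  have hml : m < s.length := by omega
  have := List.getElem?_rotate (l := s) (n := j) hml
  rw [h] at this
  rw [this, Nat.mod_eq_of_lt (by omega)]

-- a string with period g, g ∣ length, is its g-prefix repeated length/g times
lemma flatten_replicate_of_hasPeriod :
    ∀ (m : Nat) (s : List Char) (g : Nat), 0 < g → List.HasPeriod s g → s.length = m * g →
      (List.replicate m (s.take g)).flatten = s := by
  intro m
  induction m with
  | zero =>
    intro s g _ _ hlen
    simp only [Nat.zero_mul] at hlen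
    simp [List.eq_nil_of_length_eq_zero hlen]
  | succ m ih =>
    intro s g hg hper hlen
    have hgle : g ≤ s.length := by
      have := Nat.le_mul_of_pos_left g (show 0 < m + 1 by omega)
      omega
    have hdrop : (s.drop g).length = m * g := by
      rw [List.length_drop, hlen]
      have : (m + 1) * g = m * g + g := by ring
      omega
    have hperd : List.HasPeriod (s.drop g) g := by
      have h0 : s.take g ++ s.drop g ++ [] = s := by simp
      exact List.HasPeriod.factor (h0 ▸ hper)
    rcases Nat.eq_zero_or_pos m with rfl | hm
    · have h0 : s.drop g = [] := List.eq_nil_of_length_eq_zero (by simpa using hdrop)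
      have hsg : s.length = g := by omega
      simp [List.take_of_length_le (le_of_eq hsg)]
    · have hpre : s.drop g <+: s := hper.drop_prefix g
      have htake : (s.drop g).take g = s.take g := by
        rcases hpre with ⟨z, hz⟩
        conv_rhs => rw [← hz]
        rw [List.take_append_of_le_length]
        have := Nat.le_mul_of_pos_left g hm
        omega
      have hflat := ih (s.drop g) g hg hperd hdrop
      rw [htake] at hflat
      calc (List.replicate (m + 1) (s.take g)).flatten
          = s.take g ++ (List.replicate m (s.take g)).flatten := by
            simp [List.replicate_succ]
        _ = s.take g ++ s.drop g := by rw [hflat]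
        _ = s := List.take_append_drop g s

-- a pattern repeated at least twice is fixed by rotation by the pattern length
lemma rotate_eq_of_flatten_replicate (s : List Char) (k m : Nat) (hm : 2 ≤ m)
    (hk : k ≤ s.length) (h : (List.replicate m (s.take k)).flatten = s) :
    s.rotate k = s := by
  have hrep : s = s.take k ++ (List.replicate (m - 1) (s.take k)).flatten := by
    conv_lhs => rw [← h]
    have hm1 : m = (m - 1) + 1 := by omega
    rw [hm1, List.replicate_succ]
    simp
  have hlen : (s.take k).length = k := by simp [hk]
  have hdrop : s.drop k = (List.replicate (m - 1) (s.take k)).flatten := by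
    conv_lhs => rw [hrep]
    simp [hlen]
  rw [List.rotate_eq_drop_append_take hk, hdrop]
  conv_rhs => rw [← h]
  have hm1 : m = (m - 1) + 1 := by omega
  rw [hm1, List.replicate_succ']
  simp

-- core equivalence: some rotation in [1, n-1] fixes s  ↔  some divisor k ≤ n/2 repeats to s
lemma rotate_iff_divisor (s : List Char) :
    (∃ i : Nat, 1 ≤ i ∧ i + 1 ≤ s.length ∧ s.rotate i = s) ↔ (∃ k, ACond s k) := by
  constructor
  · rintro ⟨i, hi1, hin, hrot⟩
    have hper_i : List.HasPeriod s i := hasPeriod_of_rotate_eq s i (by omega) hrot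
    have hrot' : s.rotate (s.length - i) = s := by
      have h1 := List.rotate_rotate s i (s.length - i)
      rw [hrot] at h1
      rw [h1, show i + (s.length - i) = s.length by omega, List.rotate_length]
    have hper_ni : List.HasPeriod s (s.length - i) :=
      hasPeriod_of_rotate_eq s (s.length - i) (by omega) hrot'
    have hper_g : List.HasPeriod s (Nat.gcd i (s.length - i)) :=
      hper_i.gcd hper_ni (by omega)
    have hgpos : 0 < Nat.gcd i (s.length - i) := Nat.gcd_pos_of_pos_left _ (by omega)
    have hgdvd : Nat.gcd i (s.length - i) ∣ s.length := by
      have h1 := Nat.gcd_dvd_left i (s.length - i)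
      have h2 := Nat.gcd_dvd_right i (s.length - i)
      have h4 := Nat.dvd_add h1 h2
      rw [show i + (s.length - i) = s.length by omega] at h4
      exact h4
    have hgle : Nat.gcd i (s.length - i) ≤ i :=
      Nat.le_of_dvd (by omega) (Nat.gcd_dvd_left _ _)
    have h2g : 2 * Nat.gcd i (s.length - i) ≤ s.length := by
      rcases hgdvd with ⟨c, hc⟩
      have hc2 : 2 ≤ c := by nlinarith
      nlinarith
    refine ⟨Nat.gcd i (s.length - i), hgpos, h2g, hgdvd, ?_⟩
    rcases hgdvd with ⟨c, hc⟩
    rw [Nat.div_eq_of_eq_mul_left hgpos (hc.trans (Nat.mul_comm _ _))]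
    exact flatten_replicate_of_hasPeriod c s _ hgpos hper_g (by rw [Nat.mul_comm c _]; exact hc)
  · rintro ⟨k, hk1, hk2, hkd, hrep⟩
    refine ⟨k, hk1, by omega, ?_⟩
    rcases hkd with ⟨c, hc⟩
    have hdivk : s.length / k = c := by
      rw [hc]; exact Nat.mul_div_cancel_left c (by omega)
    rw [hdivk] at hrep
    exact rotate_eq_of_flatten_replicate s k c (by nlinarith) (by omega) hrep

-- offset form of the rotation: picking n chars at offset i ≤ n of s ++ s is s.rotate i
lemma take_drop_doubled (s : List Char) (i : Nat) (hi : i ≤ s.length) :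
    ((s ++ s).drop i).take s.length = s.rotate i := by
  rw [List.drop_append_of_le_length hi, List.rotate_eq_drop_append_take hi, List.take_append]
  have h1 : (s.drop i).take s.length = s.drop i := by
    rw [List.take_of_length_le]; simp
  rw [h1, List.length_drop, show s.length - (s.length - i) = i by omega]

-- the interior of the doubled string contains s  ↔  some rotation in [1, n-1] fixes s
lemma infix_doubled_iff (s : List Char) (hs : s ≠ []) :
    (s <:+: ((s ++ s).drop 1).take (s.length + s.length - 2)) ↔
      (∃ i : Nat, 1 ≤ i ∧ i + 1 ≤ s.length ∧ s.rotate i = s) := by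
  have hn : 1 ≤ s.length := List.length_pos_iff.mpr hs
  constructor
  · rintro ⟨u, v, huv⟩
    have hlen : u.length + s.length + v.length = s.length + s.length - 2 := by
      have h1 := congrArg List.length huv
      simp at h1
      omega
    refine ⟨u.length + 1, by omega, by omega, ?_⟩
    have hpre : s <+: (((s ++ s).drop 1).take (s.length + s.length - 2)).drop u.length := by
      rw [← huv, List.append_assoc, List.drop_left]
      exact ⟨v, rfl⟩
    rw [List.drop_take, List.drop_drop] at hpre
    have htk := List.prefix_iff_eq_take.mp hpre
    rw [List.take_take] at htk
    rw [show min s.length (s.length + s.length - 2 - u.length) = s.length by omega] at htk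
    rw [show 1 + u.length = u.length + 1 by omega] at htk
    rw [take_drop_doubled s (u.length + 1) (by omega)] at htk
    exact htk.symm
  · rintro ⟨i, hi1, hin, hrot⟩
    have hpre : s <+: (((s ++ s).drop 1).take (s.length + s.length - 2)).drop (i - 1) := by
      rw [List.prefix_iff_eq_take, List.drop_take, List.drop_drop, List.take_take]
      rw [show min s.length (s.length + s.length - 2 - (i - 1)) = s.length by omega]
      rw [show 1 + (i - 1) = i by omega, take_drop_doubled s i (by omega), hrot]
    exact hpre.isInfix.trans (List.drop_suffix _ _).isInfix

-- `Nat.toDigitsCore` never shrinks a nonempty accumulator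
lemma toDigitsCore_ne_nil (b : Nat) :
    ∀ (f n : Nat) (l : List Char), l ≠ [] → Nat.toDigitsCore b f n l ≠ [] := by
  intro f
  induction f with
  | zero => intro n l hl; simpa [Nat.toDigitsCore] using hl
  | succ f ih =>
    intro n l hl
    rw [Nat.toDigitsCore]
    split
    · simp
    · exact ih _ _ (by simp)

lemma toChars_ne_nil (num : Int) : PySem.Int.toChars num ≠ [] := by
  have hd : ∀ m : Nat, Nat.toDigits 10 m ≠ [] := by
    intro m
    rw [Nat.toDigits, Nat.toDigitsCore]
    split
    · simp
    · exact toDigitsCore_ne_nil 10 _ _ _ (by simp)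
  unfold PySem.Int.toChars
  split
  · simp
  · exact hd _

-- both ports, reduced to the two equivalent existentials
lemma main_lemma (s : List Char) (hs : s ≠ []) :
    part2Loop s (s.length : Int)
        (PySem.List.pyRange 1 (PySem.Int.floordiv (s.length : Int) 2 + 1) 1) =
      if PySem.Chars.find (PySem.List.slice (s ++ s) (some 1) (some (-1))) s ≠ -1 then some true
      else none := by
  have hn : 1 ≤ s.length := List.length_pos_iff.mpr hs
  have hslice : PySem.List.slice (s ++ s) (some 1) (some (-1)) =
      ((s ++ s).drop 1).take (s.length + s.length - 2) := by
    have h1 : PySem.List.clampIdx (s ++ s).length 1 = 1 := by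
      simp [PySem.List.clampIdx, List.length_append]
      omega
    have h2 : PySem.List.clampIdx (s ++ s).length (-1) = s.length + s.length - 1 := by
      simp only [PySem.List.clampIdx, List.length_append,
        if_pos (show (-1 : Int) < 0 by norm_num)]
      split_ifs with hneg
      · omega
      · omega
    simp only [PySem.List.slice, h1, h2]
    congr 1
  have hB : (PySem.Chars.find (PySem.List.slice (s ++ s) (some 1) (some (-1))) s ≠ -1) ↔
      ∃ k, ACond s k := by
    rw [PySem.Chars.find_ne_neg_one_iff, hslice, infix_doubled_iff s hs, rotate_iff_divisor]
  rw [part2Loop_eq]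
  by_cases h : ∃ k, ACond s k
  · rw [if_pos ((exists_range_iff s).mpr h), if_pos (hB.mpr h)]
  · rw [if_neg (fun hc => h ((exists_range_iff s).mp hc)),
      if_neg (fun hc => h (hB.mp hc))]

lemma len_toChars (num : Int) :
    PySem.Chars.len (PySem.Int.toChars num) = ((PySem.Int.toChars num).length : Int) := by
  simp

-- ===== VERDICT (by name: the statement is the Claim_ definition above) =====
theorem part2_repeating_split_spec : Claim_equal_part2_repeating_split := by
  intro num _
  unfold Spec_part2_repeating_split part2_repeating_split part2_repeating_split_alt
  show part2Loop (PySem.Int.toChars num) (PySem.Chars.len (PySem.Int.toChars num))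
      (PySem.List.pyRange 1 (PySem.Int.floordiv (PySem.Chars.len (PySem.Int.toChars num)) 2 + 1) 1) =
    if PySem.Chars.find
        (PySem.List.slice (PySem.Int.toChars num ++ PySem.Int.toChars num) (some 1) (some (-1)))
        (PySem.Int.toChars num) ≠ -1 then some true
    else none
  rw [len_toChars]
  exact main_lemma _ (toChars_ne_nil num)
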